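-- pv_equiv track=rewrite | github.com/Jongwon-0518/Algorithm | programmers/lv2gun.py | solution
-- ===== SOURCE A (Python) =====
-- def function2(i, k, data, answer, answer_list):
--         if len(answer)==11:
--             answer_list.append(answer)
--             return
--         else:
--             function2(i+1, k, data, answer + [0], answer_list)
--             if data[i]+1<=k:
--                 function2(i+1, k-data[i]-1, data, answer + [data[i]+1], answer_list)
--
-- def solution(n, info):
--     answer_list = []
--
--     def score(a, b):
--         a_score, b_score = 0, 0
--         for i in range(11):
--             if a[i] == b[i] == 0:
--                 pass
--             elif a[i] < b[i]:
--                 b_score += (10-i)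
--             else:
--                 a_score += (10-i)
--         return b_score - a_score
--
--
--     function2(0, n, info, [], answer_list)
--
--     new_answer_list = []
--
--     for i in answer_list:
--         if sum(i)<n:
--             i[10] += (n-sum(i))
--         new_answer_list.append([score(info, i), i])
--
--     new_answer_list.sort()
--     res = []
--     for i in range(len(new_answer_list)-1, -1, -1):
--         if new_answer_list[i][0] == new_answer_list[-1][0]:
--             res.append(new_answer_list[i][1])
--         else:
--             break
--     for i in res:
--         i.reverse()
--     res.sort()
--     for i in res:
--         i.reverse()
--     if new_answer_list[-1][0] > 0:
--         return res[-1]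
--     else:
--         return [-1]
-- ===== SOURCE B (Python) =====
-- def solution(n, info):
--     # Iterative level-by-level doubling (breadth-first product) of the hit/skip
--     # choices, each candidate carrying its remaining arrow budget, instead of A's
--     # DFS recursion; and a single running-max pass keyed by (score difference,
--     # reversed array) instead of A's sort + suffix-collect + reverse/sort/reverse.
--     combos = [([], n)]
--     for hits in info[:11]:
--         combos = [(c + [0], k) for c, k in combos] + \
--                  [(c + [hits + 1], k - hits - 1) for c, k in combos if hits + 1 <= k]
--     best = None
--     for c, k in combos:
--         if k > 0:  # leftover arrows go to the 1-point ring
--             c[10] += k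
--         sc = 0
--         for i in range(11):
--             if info[i] == c[i] == 0:
--                 continue
--             if info[i] < c[i]:
--                 sc += 10 - i
--             else:
--                 sc -= 10 - i
--         if best is None or sc > best[0] or (sc == best[0] and best[2] < c[::-1]):
--             best = (sc, c, c[::-1])
--     return best[1] if best[0] > 0 else [-1]
-- ===== Notes on version B (the rewrite author's own statement) =====
-- stated objective: alternative
-- what changed: B enumerates the hit/skip combinations by iterative level-by-level list doubling over (candidate, remaining-budget) pairs (a breadth-first traversal) instead of A's DFS recursion, and selects the winner in one running-max pass keyed by (score difference, reversed array) instead of A's sort of [score, arr] pairs, suffix collection, and a second reverse/sort/reverse pass.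
import Mathlib
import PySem

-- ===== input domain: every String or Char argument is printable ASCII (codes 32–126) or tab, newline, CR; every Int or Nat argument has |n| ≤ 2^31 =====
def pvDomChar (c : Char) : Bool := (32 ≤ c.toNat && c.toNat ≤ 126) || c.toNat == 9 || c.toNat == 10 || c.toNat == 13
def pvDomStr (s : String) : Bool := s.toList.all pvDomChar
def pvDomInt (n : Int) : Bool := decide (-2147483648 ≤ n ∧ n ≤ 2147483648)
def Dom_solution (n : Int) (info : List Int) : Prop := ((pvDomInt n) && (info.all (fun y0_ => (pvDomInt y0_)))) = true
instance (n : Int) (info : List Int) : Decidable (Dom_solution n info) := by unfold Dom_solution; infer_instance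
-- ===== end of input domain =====

-- B replaces A's pruned DFS recursion over the 2^11 hit/skip choices by iterative list
-- doubling plus a filter, and A's sort / suffix-collect / reverse-sort-reverse selection
-- by one running-max pass keyed by (score difference, reversed array); same cost class.

-- ===== PORT A =====

-- score(a, b) of A: fold over range(11) carrying (a_score, b_score), returns b_score - a_score
def scoreA (a b : List Int) : Int :=
  let st := (PySem.List.pyRange 0 11 1).foldl (fun st i =>
    if PySem.List.pyGetD a i 0 = PySem.List.pyGetD b i 0 ∧ PySem.List.pyGetD b i 0 = 0 then st
    else if PySem.List.pyGetD a i 0 < PySem.List.pyGetD b i 0 then (st.1, st.2 + (10 - i))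
    else (st.1 + (10 - i), st.2)) ((0 : Int), (0 : Int))
  st.2 - st.1

-- function2 of A; the Python test `len(answer)==11` is ported as `11 ≤ answer.length`
-- (a termination guard: equal on every reachable call, where the length grows 0,1,…,11)
def function2 (i k : Int) (data answer : List Int) (answer_list : List (List Int)) :
    List (List Int) :=
  if 11 ≤ answer.length then answer_list ++ [answer]
  else
    let al := function2 (i+1) k data (answer ++ [0]) answer_list
    if PySem.List.pyGetD data i 0 + 1 ≤ k then
      function2 (i+1) (k - PySem.List.pyGetD data i 0 - 1) data
        (answer ++ [PySem.List.pyGetD data i 0 + 1]) al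
    else al
termination_by 11 - answer.length
decreasing_by all_goals simp; omega

-- the `for i in range(len(s)-1, -1, -1): … else break` collection loop of A
def resLoopA (s : List (Int × List Int)) (lastFst : Int) : Nat → List (List Int)
  | 0 => []
  | (j+1) =>
    if (PySem.List.pyGetD s (j : Int) (0, [])).1 = lastFst then
      (PySem.List.pyGetD s (j : Int) (0, [])).2 :: resLoopA s lastFst j
    else []

def solution (n : Int) (info : List Int) : List Int :=
  let answer_list := function2 0 n info [] []
  let new_answer_list := answer_list.foldl (fun acc i =>
    let i := if i.sum < n then i.set 10 (PySem.List.pyGetD i 10 0 + (n - i.sum)) else i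
    acc ++ [(scoreA info i, i)]) []
  let s := PySem.List.sorted2 new_answer_list Prod.fst Prod.snd
  let lastPair := PySem.List.pyGetD s (-1) (0, [])
  let res := resLoopA s lastPair.1 s.length
  let res1 := res.map List.reverse
  let res2 := PySem.List.sorted res1 (fun x => x)
  let res3 := res2.map List.reverse
  if lastPair.1 > 0 then PySem.List.pyGetD res3 (-1) [] else [-1]

-- ===== PORT B =====

-- the inner scoring loop of B: one signed accumulator
def scoreB (info c : List Int) : Int :=
  (PySem.List.pyRange 0 11 1).foldl (fun sc i =>
    if PySem.List.pyGetD info i 0 = PySem.List.pyGetD c i 0 ∧ PySem.List.pyGetD c i 0 = 0 then sc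
    else if PySem.List.pyGetD info i 0 < PySem.List.pyGetD c i 0 then sc + (10 - i)
    else sc - (10 - i)) 0

-- one doubling step on (candidate, remaining budget) pairs:
-- combos = [(c+[0], k) for c, k in combos] + [(c+[hits+1], k-hits-1) for c, k in combos if hits+1 <= k]
def combosStep (cs : List (List Int × Int)) (hits : Int) : List (List Int × Int) :=
  cs.map (fun p => (p.1 ++ [0], p.2)) ++
    (cs.filter (fun p => hits + 1 ≤ p.2)).map (fun p => (p.1 ++ [hits + 1], p.2 - hits - 1))

-- body of B's running-max loop; best carries (score, candidate, reversed candidate)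
def bestStep (info : List Int) (best : Option (Int × List Int × List Int))
    (p : List Int × Int) : Option (Int × List Int × List Int) :=
  let c := if 0 < p.2 then p.1.set 10 (PySem.List.pyGetD p.1 10 0 + p.2) else p.1
  let sc := scoreB info c
  match best with
  | none => some (sc, c, c.reverse)
  | some (bs, bc, br) =>
    if bs < sc ∨ (sc = bs ∧ br < c.reverse) then some (sc, c, c.reverse)
    else some (bs, bc, br)

def solution_alt (n : Int) (info : List Int) : List Int :=
  let combos := (PySem.List.slice info none (some 11)).foldl combosStep [([], n)]
  match combos.foldl (bestStep info) none with
  | none => []   -- unreachable: the all-skip pair survives every doubling step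
  | some (bs, bc, _) => if bs > 0 then bc else [-1]

-- ===== PRECONDITION & SPEC =====
-- A indexes info[0..10] unconditionally (function2 and score), so it raises
-- IndexError on lists shorter than 11; exactly those inputs are excluded.
def Pre_solution (n : Int) (info : List Int) : Prop :=
  11 ≤ info.length
instance (n : Int) (info : List Int) : Decidable (Pre_solution n info) := by
  unfold Pre_solution; infer_instance

def pvWitness_solution : Int × List Int := (5, [2, 1, 1, 1, 0, 0, 0, 0, 0, 0, 0])

def Spec_solution (n : Int) (info : List Int) (out : List Int) : Prop := out = solution_alt n info
instance (n : Int) (info : List Int) (out : List Int) : Decidable (Spec_solution n info out) := by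
  unfold Spec_solution; infer_instance

-- ===== CLAIM (what is proved, stated in full; the proofs are below) =====
def Claim_equal_solution : Prop := ∀ (n : Int) (info : List Int), Dom_solution n info →
  Pre_solution n info → Spec_solution n info (solution n info)

-- ===== LEMMAS AND PROOFS =====

-- `c` picks, ring by ring, either 0 or one more arrow than the opponent's count,
-- a taken ring only when it fits the remaining budget
inductive GenRel : List Int → Int → List Int → Prop
  | nil (k : Int) : GenRel [] k []
  | zero {r : Int} {rs : List Int} {k : Int} {c : List Int} :
      GenRel rs k c → GenRel (r :: rs) k (0 :: c)
  | take {r : Int} {rs : List Int} {k : Int} {c : List Int} :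
      r + 1 ≤ k → GenRel rs (k - r - 1) c → GenRel (r :: rs) k ((r + 1) :: c)

-- the candidate list A's recursion produces, abstracted
def genA : List Int → Int → List (List Int)
  | [], _ => [[]]
  | r :: rs, k =>
    (genA rs k).map (0 :: ·) ++
      (if r + 1 ≤ k then (genA rs (k - r - 1)).map ((r + 1) :: ·) else [])

-- pour the leftover arrows (if any) into ring index 10
def adjA (n : Int) (c : List Int) : List Int :=
  if c.sum < n then c.set 10 (PySem.List.pyGetD c 10 0 + (n - c.sum)) else c

-- B's in-loop adjustment of a (candidate, leftover) pair
def adjP (p : List Int × Int) : List Int :=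
  if 0 < p.2 then p.1.set 10 (PySem.List.pyGetD p.1 10 0 + p.2) else p.1

theorem genRel_cons_iff {r : Int} {rs : List Int} {k : Int} {u : List Int} :
    GenRel (r :: rs) k u ↔
      (∃ t, u = 0 :: t ∧ GenRel rs k t) ∨
        (∃ t, u = (r + 1) :: t ∧ r + 1 ≤ k ∧ GenRel rs (k - r - 1) t) := by
  constructor
  · intro h; cases h with
    | zero h => exact Or.inl ⟨_, rfl, h⟩
    | take hk h => exact Or.inr ⟨_, rfl, hk, h⟩
  · rintro (⟨t, rfl, ht⟩ | ⟨t, rfl, hk, ht⟩)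
    · exact GenRel.zero ht
    · exact GenRel.take hk ht

theorem genRel_zero (rs : List Int) (k : Int) : GenRel rs k (List.replicate rs.length 0) := by
  induction rs generalizing k with
  | nil => exact GenRel.nil k
  | cons r rs ih => simpa [List.replicate] using GenRel.zero (ih k)

theorem mem_genA {rs : List Int} {k : Int} {c : List Int} :
    c ∈ genA rs k ↔ GenRel rs k c := by
  induction rs generalizing k c with
  | nil =>
    simp only [genA, List.mem_singleton]
    constructor
    · rintro rfl; exact GenRel.nil k
    · intro h; cases h; rfl
  | cons r rs ih =>
    simp only [genA, List.mem_append, List.mem_map]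
    rw [genRel_cons_iff]
    constructor
    · rintro (⟨t, ht, rfl⟩ | h)
      · exact Or.inl ⟨t, rfl, ih.mp ht⟩
      · split_ifs at h with hk
        · obtain ⟨t, ht, rfl⟩ := List.mem_map.mp h
          exact Or.inr ⟨t, rfl, hk, ih.mp ht⟩
        · simp at h
    · rintro (⟨t, rfl, ht⟩ | ⟨t, rfl, hk, ht⟩)
      · exact Or.inl ⟨t, ih.mpr ht, rfl⟩
      · right
        rw [if_pos hk]
        exact List.mem_map.mpr ⟨t, ih.mpr ht, rfl⟩

theorem function2_eq (data : List Int) (hd : 11 ≤ data.length) :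
    ∀ (m : Nat) (answer : List Int) (k : Int) (acc : List (List Int)),
      answer.length + m = 11 →
      function2 (answer.length : Int) k data answer acc =
        acc ++ (genA ((data.drop answer.length).take m) k).map (answer ++ ·) := by
  intro m
  induction m with
  | zero =>
    intro answer k acc h
    rw [function2]
    simp [genA, show (11:Nat) ≤ answer.length by omega]
  | succ m ih =>
    intro answer k acc h
    have hlen : answer.length < 11 := by omega
    have hidx : answer.length < data.length := by omega
    have hget : PySem.List.pyGetD data (answer.length : Int) 0 = data[answer.length] := by
      simp [PySem.List.pyGetD, PySem.List.pyGet?, PySem.List.pyIdx?, hidx]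
    have htake : (data.drop answer.length).take (m+1)
        = data[answer.length] :: ((data.drop (answer.length + 1)).take m) := by
      rw [List.drop_eq_getElem_cons hidx, List.take_succ_cons]
    have e0 : ∀ acc' : List (List Int),
        function2 ((answer.length : Int) + 1) k data (answer ++ [0]) acc' =
          acc' ++ (genA ((data.drop (answer.length + 1)).take m) k).map ((answer ++ [0]) ++ ·) := by
      intro acc'
      have := ih (answer ++ [0]) k acc' (by simp; omega)
      simpa using this
    have e1 : ∀ acc' : List (List Int),
        function2 ((answer.length : Int) + 1) (k - data[answer.length] - 1) data
            (answer ++ [data[answer.length] + 1]) acc' =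
          acc' ++ (genA ((data.drop (answer.length + 1)).take m) (k - data[answer.length] - 1)).map
            ((answer ++ [data[answer.length] + 1]) ++ ·) := by
      intro acc'
      have := ih (answer ++ [data[answer.length] + 1]) (k - data[answer.length] - 1) acc'
        (by simp; omega)
      simpa using this
    rw [function2, if_neg (by omega), hget, htake]
    split_ifs with hk
    · rw [e0, e1]
      simp only [genA]
      rw [if_pos hk]
      simp [List.map_map, Function.comp_def]
    · rw [e0]
      simp only [genA]
      rw [if_neg hk]
      simp [List.map_map, Function.comp_def]

-- B's doubling loop produces exactly the budget-pruned choice lists, with the leftover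
theorem mem_combos_foldl :
    ∀ (rs : List Int) (cs : List (List Int × Int)) (x : List Int × Int),
      x ∈ rs.foldl combosStep cs ↔
        ∃ p ∈ cs, ∃ t, x = (p.1 ++ t, p.2 - t.sum) ∧ GenRel rs p.2 t := by
  intro rs
  induction rs with
  | nil =>
    intro cs x
    constructor
    · intro h
      exact ⟨x, h, [], by simp, GenRel.nil _⟩
    · rintro ⟨p, hp, t, rfl, ht⟩
      cases ht; simpa using hp
  | cons r rs ih =>
    intro cs x
    rw [List.foldl_cons, ih]
    constructor
    · rintro ⟨p, hp, t, rfl, ht⟩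
      rcases List.mem_append.mp hp with hp | hp
      · obtain ⟨q, hq, rfl⟩ := List.mem_map.mp hp
        refine ⟨q, hq, 0 :: t, by simp, GenRel.zero ht⟩
      · obtain ⟨q, hq, rfl⟩ := List.mem_map.mp hp
        obtain ⟨hqmem, hqle⟩ := List.mem_filter.mp hq
        refine ⟨q, hqmem, (r + 1) :: t, by simp; omega, ?_⟩
        exact GenRel.take (by simpa using hqle) ht
    · rintro ⟨p, hp, t, rfl, ht⟩
      rcases genRel_cons_iff.mp ht with ⟨t', rfl, ht'⟩ | ⟨t', rfl, hk, ht'⟩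
      · refine ⟨(p.1 ++ [0], p.2), List.mem_append.mpr (Or.inl (List.mem_map.mpr ⟨p, hp, rfl⟩)),
          t', by simp, ht'⟩
      · refine ⟨(p.1 ++ [r + 1], p.2 - r - 1),
          List.mem_append.mpr (Or.inr (List.mem_map.mpr
            ⟨p, List.mem_filter.mpr ⟨hp, by simpa using hk⟩, rfl⟩)),
          t', by simp; omega, ht'⟩

theorem foldl_score_pair (a b : List Int) :
    ∀ (l : List Int) (s1 s2 : Int),
      (l.foldl (fun st i =>
        if PySem.List.pyGetD a i 0 = PySem.List.pyGetD b i 0 ∧ PySem.List.pyGetD b i 0 = 0 then st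
        else if PySem.List.pyGetD a i 0 < PySem.List.pyGetD b i 0 then (st.1, st.2 + (10 - i))
        else (st.1 + (10 - i), st.2)) (s1, s2)).2 -
      (l.foldl (fun st i =>
        if PySem.List.pyGetD a i 0 = PySem.List.pyGetD b i 0 ∧ PySem.List.pyGetD b i 0 = 0 then st
        else if PySem.List.pyGetD a i 0 < PySem.List.pyGetD b i 0 then (st.1, st.2 + (10 - i))
        else (st.1 + (10 - i), st.2)) (s1, s2)).1 =
      l.foldl (fun sc i =>
        if PySem.List.pyGetD a i 0 = PySem.List.pyGetD b i 0 ∧ PySem.List.pyGetD b i 0 = 0 then sc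
        else if PySem.List.pyGetD a i 0 < PySem.List.pyGetD b i 0 then sc + (10 - i)
        else sc - (10 - i)) (s2 - s1) := by
  intro l
  induction l with
  | nil => simp
  | cons x l ih =>
    intro s1 s2
    simp only [List.foldl_cons]
    split_ifs <;> [skip; skip; skip] <;> rw [ih] <;> ring_nf

theorem scoreA_eq_scoreB (a b : List Int) : scoreA a b = scoreB a b := by
  have := foldl_score_pair a b (PySem.List.pyRange 0 11 1) 0 0
  simpa [scoreA, scoreB] using this

theorem sorted2_eq_sorted_lex (xs : List (Int × List Int)) :
    PySem.List.sorted2 xs Prod.fst Prod.snd =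
      PySem.List.sorted xs (fun p => toLex (p.1, p.2)) := by
  simp only [PySem.List.sorted2, PySem.List.sorted]
  congr 1
  funext a x
  congr 1
  funext p q
  rcases lt_trichotomy p.1 q.1 with h | h | h
  · simp [Prod.Lex.lt_iff, h, not_lt.mpr (le_of_lt h)]
  · simp [Prod.Lex.lt_iff, h]
  · have h1 : ¬ p.1 < q.1 := not_lt_of_gt h
    have h2 : p.1 ≠ q.1 := ne_of_gt h
    simp [Prod.Lex.lt_iff, h1, h2]
    exact fun h3 => absurd h3 (not_le.mpr h)

theorem pyGetD_nat {α : Type} (l : List α) (j : Nat) (hj : j < l.length) (d : α) :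
    PySem.List.pyGetD l (j : Int) d = l[j] := by
  simp [PySem.List.pyGetD, PySem.List.pyGet?, PySem.List.pyIdx?, hj]

theorem pyGetD_neg_one {α : Type} (l : List α) (h : l ≠ []) (d : α) :
    PySem.List.pyGetD l (-1) d = l.getLast h := by
  have hl : 0 < l.length := List.length_pos_iff.mpr h
  have h1 : -(l.length : Int) ≤ -1 := by omega
  simp only [PySem.List.pyGetD, PySem.List.pyGet?, PySem.List.pyIdx?]
  rw [if_neg (by omega), if_pos h1]
  simp only [Option.bind_some]
  have : l.length - (-(-1 : Int)).toNat = l.length - 1 := by norm_num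
  rw [this, List.getLast_eq_getElem]
  simp [List.getElem?_eq_getElem (by omega : l.length - 1 < l.length)]

theorem pairwise_le_getLast {α κ : Type} [LinearOrder κ] (key : α → κ) (l : List α)
    (hp : l.Pairwise (fun a b => key a ≤ key b)) (h : l ≠ []) :
    ∀ x ∈ l, key x ≤ key (l.getLast h) := by
  induction l with
  | nil => simp at h
  | cons a l ih =>
    intro x hx
    rcases List.mem_cons.mp hx with rfl | hx
    · cases l with
      | nil => simp
      | cons b l =>
        rw [List.getLast_cons (by simp)]
        exact le_trans ((List.pairwise_cons.mp hp).1 _ (List.getLast_mem _))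
          (le_refl _)
    · have hl : l ≠ [] := List.ne_nil_of_mem hx
      rw [List.getLast_cons hl]
      exact ih (List.pairwise_cons.mp hp).2 hl x hx

theorem resLoopA_eq (s : List (Int × List Int)) (M : Int) :
    ∀ j, j ≤ s.length →
      resLoopA s M j = (((s.take j).reverse).takeWhile (fun p => p.1 = M)).map Prod.snd := by
  intro j
  induction j with
  | zero => simp [resLoopA]
  | succ j ih =>
    intro hj
    have hjl : j < s.length := by omega
    have hsplit : (s.take (j+1)).reverse = s[j] :: (s.take j).reverse := by
      rw [List.take_add_one, List.getElem?_eq_getElem hjl]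
      simp
    rw [resLoopA, pyGetD_nat s j hjl, hsplit, List.takeWhile_cons]
    by_cases h : s[j].1 = M
    · simp [h, ih (by omega)]
    · simp [h]

theorem mem_takeWhile_top (M : Int) :
    ∀ (l : List (Int × List Int)), l.Pairwise (fun a b => b.1 ≤ a.1) →
      (∀ p ∈ l, p.1 ≤ M) → ∀ p ∈ l, p.1 = M → p ∈ l.takeWhile (fun q => q.1 = M) := by
  intro l
  induction l with
  | nil => simp
  | cons a t ih =>
    intro hp hb p hmem hpM
    have ha : a.1 ≤ M := hb a (by simp)
    rcases List.mem_cons.mp hmem with rfl | hmem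
    · rw [List.takeWhile_cons, if_pos (by simpa using hpM)]
      simp
    · have haM : a.1 = M := by
        have := (List.pairwise_cons.mp hp).1 p hmem
        omega
      rw [List.takeWhile_cons, if_pos (by simpa using haM)]
      exact List.mem_cons_of_mem _ (ih (List.pairwise_cons.mp hp).2
        (fun q hq => hb q (by simp [hq])) p hmem hpM)

theorem mem_resLoopA (s : List (Int × List Int))
    (hp : s.Pairwise (fun a b => a.1 ≤ b.1)) (hs : s ≠ [])
    (y : List Int) :
    y ∈ resLoopA s (s.getLast hs).1 s.length ↔
      ∃ p ∈ s, p.1 = (s.getLast hs).1 ∧ p.2 = y := by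
  rw [resLoopA_eq s _ s.length (le_refl _), List.take_length]
  constructor
  · intro h
    obtain ⟨p, hpmem, rfl⟩ := List.mem_map.mp h
    have h1 : p ∈ s.reverse := List.IsPrefix.mem hpmem (List.takeWhile_prefix _)
    have h2 := List.mem_takeWhile_imp hpmem
    exact ⟨p, List.mem_reverse.mp h1, by simpa using h2, rfl⟩
  · rintro ⟨p, hpmem, hpM, rfl⟩
    refine List.mem_map.mpr ⟨p, ?_, rfl⟩
    have hrev : s.reverse.Pairwise (fun a b => b.1 ≤ a.1) := by
      rw [List.pairwise_reverse]; exact hp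
    have hbound : ∀ q ∈ s.reverse, q.1 ≤ (s.getLast hs).1 := by
      intro q hq
      exact pairwise_le_getLast Prod.fst s hp hs q (List.mem_reverse.mp hq)
    exact mem_takeWhile_top _ _ hrev hbound p (List.mem_reverse.mpr hpmem) hpM

-- invariant of B's running-max fold: P is the prefix processed so far

-- B's in-loop adjustment coincides with A's on a pair carrying leftover n - sum
theorem adjP_eq_adjA (n : Int) (c : List Int) : adjP (c, n - c.sum) = adjA n c := by
  simp only [adjP, adjA]
  by_cases h : c.sum < n
  · rw [if_pos (by omega : (0:Int) < n - c.sum), if_pos h]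
  · rw [if_neg (by omega : ¬ (0:Int) < n - c.sum), if_neg h]

-- invariant of B's running-max fold over the processed prefix l
def bestInv (info : List Int) (l : List (List Int × Int))
    (st : Option (Int × List Int × List Int)) : Prop :=
  match st with
  | none => l = []
  | some (sc, bc, br) =>
    (∃ p ∈ l, bc = adjP p) ∧ sc = scoreB info bc ∧ br = bc.reverse ∧
      ∀ p ∈ l,
        scoreB info (adjP p) < sc ∨
          (scoreB info (adjP p) = sc ∧ ¬ br < (adjP p).reverse)

theorem bestInv_step (info : List Int) (P : List (List Int × Int)) (p : List Int × Int)
    (st : Option (Int × List Int × List Int)) (h : bestInv info P st) :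
    bestInv info (P ++ [p]) (bestStep info st p) := by
  cases st with
  | none =>
    have hstep : bestStep info none p =
        some (scoreB info (adjP p), adjP p, (adjP p).reverse) := rfl
    rw [hstep]
    subst h
    refine ⟨⟨p, by simp, rfl⟩, rfl, rfl, ?_⟩
    intro q hq
    simp at hq; subst hq
    exact Or.inr ⟨rfl, lt_irrefl _⟩
  | some t =>
    obtain ⟨bs, bc, br⟩ := t
    obtain ⟨⟨p0, hp0, hbc⟩, h2, h3, h4⟩ := h
    have hstep : bestStep info (some (bs, bc, br)) p =
        if bs < scoreB info (adjP p) ∨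
            (scoreB info (adjP p) = bs ∧ br < (adjP p).reverse) then
          some (scoreB info (adjP p), adjP p, (adjP p).reverse)
        else some (bs, bc, br) := rfl
    rw [hstep]
    by_cases hrepl : bs < scoreB info (adjP p) ∨
        (scoreB info (adjP p) = bs ∧ br < (adjP p).reverse)
    · rw [if_pos hrepl]
      refine ⟨⟨p, by simp, rfl⟩, rfl, rfl, ?_⟩
      intro q hq
      rcases List.mem_append.mp hq with hq | hq
      · rcases h4 q hq with h5 | ⟨h5, h6⟩
        · left
          rcases hrepl with h7 | ⟨h7, h8⟩ <;> omega
        · rcases hrepl with h7 | ⟨h7, h8⟩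
          · left; omega
          · refine Or.inr ⟨by omega, ?_⟩
            exact fun hlt => absurd (lt_trans hlt (lt_of_le_of_lt (not_lt.mp h6)
              (h3 ▸ h8))) (lt_irrefl _)
      · simp at hq; subst hq
        exact Or.inr ⟨rfl, lt_irrefl _⟩
    · rw [if_neg hrepl]
      refine ⟨⟨p0, by simp [hp0], hbc⟩, h2, h3, ?_⟩
      intro q hq
      rcases List.mem_append.mp hq with hq | hq
      · exact h4 q hq
      · simp at hq; subst hq
        rw [not_or] at hrepl
        obtain ⟨h5, h6⟩ := hrepl
        rcases lt_trichotomy (scoreB info (adjP q)) bs with h7 | h7 | h7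
        · exact Or.inl h7
        · exact Or.inr ⟨h7, fun hlt => h6 ⟨h7, hlt⟩⟩
        · exact absurd h7 h5

theorem bestInv_foldl (info : List Int) :
    ∀ (l P : List (List Int × Int)) (st : Option (Int × List Int × List Int)),
      bestInv info P st → bestInv info (P ++ l) (l.foldl (bestStep info) st) := by
  intro l
  induction l with
  | nil => intro P st h; simpa using h
  | cons p l ih =>
    intro P st h
    have := ih (P ++ [p]) (bestStep info st p) (bestInv_step info P p st h)
    simpa using this

-- the per-element map A's accumulating loop computes
theorem newlist_map (n : Int) (info : List Int) :
    (genA (info.take 11) n).foldl (fun acc i =>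
      let i := if i.sum < n then i.set 10 (PySem.List.pyGetD i 10 0 + (n - i.sum)) else i
      acc ++ [(scoreA info i, i)]) [] =
    (genA (info.take 11) n).map (fun c => (scoreB info (adjA n c), adjA n c)) := by
  rw [PySem.List.foldl_append_singleton_eq_map]
  refine List.map_congr_left ?_
  intro c _
  rw [scoreA_eq_scoreB]
  rfl

-- ===== VERDICT (by name: the statement is the Claim_ definition above) =====
theorem solution_spec : Claim_equal_solution := by
  intro n info _ hpre
  have hlen : 11 ≤ info.length := hpre
  have hrlen : (info.take 11).length = 11 := by simp; omega
  -- A side: the candidate list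
  have hA1 : function2 0 n info [] [] = genA (info.take 11) n := by
    have := function2_eq info (by omega) 11 [] n [] (by simp)
    simpa using this
  -- the zero candidate is always generated
  have hzero : List.replicate 11 (0 : Int) ∈ genA (info.take 11) n := by
    refine mem_genA.mpr ?_
    have := genRel_zero (info.take 11) n
    rwa [hrlen] at this
  have hgen_ne : genA (info.take 11) n ≠ [] := List.ne_nil_of_mem hzero
  -- B side: the candidate list
  have hslice : PySem.List.slice info none (some 11) = info.take 11 := by
    rw [PySem.List.slice_to info (by norm_num)]
    rfl
  have hcomb : ∀ x, x ∈ (info.take 11).foldl combosStep [([], n)] ↔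
      ∃ t, x = (t, n - t.sum) ∧ GenRel (info.take 11) n t := by
    intro x
    rw [mem_combos_foldl]
    constructor
    · rintro ⟨p, hp, t, rfl, ht⟩
      simp at hp; subst hp
      exact ⟨t, by simp, ht⟩
    · rintro ⟨t, rfl, ht⟩
      exact ⟨([], n), by simp, t, by simp, ht⟩
  have hinv : bestInv info ((info.take 11).foldl combosStep [([], n)])
      ((((info.take 11).foldl combosStep [([], n)])).foldl (bestStep info) none) := by
    have h0 : bestInv info [] none := rfl
    simpa using bestInv_foldl info ((info.take 11).foldl combosStep [([], n)]) [] none h0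
  rcases hresB : ((((info.take 11).foldl combosStep [([], n)])).foldl (bestStep info) none) with
    _ | ⟨bs, bc, br⟩
  · rw [hresB] at hinv
    exfalso
    have hzc : (List.replicate 11 (0 : Int), n - (List.replicate 11 (0 : Int)).sum)
        ∈ (info.take 11).foldl combosStep [([], n)] := by
      rw [hcomb]
      refine ⟨List.replicate 11 (0 : Int), rfl, ?_⟩
      have := genRel_zero (info.take 11) n
      rwa [hrlen] at this
    rw [hinv] at hzc
    simp at hzc
  · rw [hresB] at hinv
    obtain ⟨⟨p1, hp1mem, hbc⟩, hbs, hbr, hmaxB⟩ := hinv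
    obtain ⟨c1, hp1eq, hc1rel⟩ := (hcomb p1).mp hp1mem
    have hbc' : bc = adjA n c1 := by rw [hbc, hp1eq, adjP_eq_adjA]
    have hc1G : c1 ∈ genA (info.take 11) n := mem_genA.mpr hc1rel
    -- B's maximality restated over genA
    have hmaxG : ∀ c ∈ genA (info.take 11) n,
        scoreB info (adjA n c) < bs ∨
          (scoreB info (adjA n c) = bs ∧ ¬ br < (adjA n c).reverse) := by
      intro c hc
      have hx : (c, n - c.sum) ∈ (info.take 11).foldl combosStep [([], n)] :=
        (hcomb _).mpr ⟨c, rfl, mem_genA.mp hc⟩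
      have := hmaxB _ hx
      rwa [adjP_eq_adjA] at this
    unfold Spec_solution
    simp only [solution, solution_alt, hA1, hslice, hresB, newlist_map n info,
      sorted2_eq_sorted_lex]
    set G := genA (List.take 11 info) n with hG
    set pairs := G.map (fun c => (scoreB info (adjA n c), adjA n c)) with hpairs
    set S := PySem.List.sorted pairs (fun p => toLex (p.1, p.2)) with hSdef
    have hpairs_ne : pairs ≠ [] := by
      rw [hpairs]; simpa using hgen_ne
    have hS_ne : S ≠ [] := fun h => hpairs_ne ((PySem.List.sorted_eq_nil_iff _ _ _).mp h)
    have hSperm : S.Perm pairs := PySem.List.sorted_perm pairs _ false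
    have hSpair : S.Pairwise (fun a b => (fun p => toLex (p.1, p.2)) a ≤ (fun p => toLex (p.1, p.2)) b) :=
      PySem.List.sorted_pairwise pairs _
    have hSfst : S.Pairwise (fun a b => a.1 ≤ b.1) := by
      refine hSpair.imp ?_
      intro a b h
      rcases Prod.Lex.le_iff.mp h with h | ⟨h, -⟩
      · exact le_of_lt h
      · exact le_of_eq h
    have hlastget : PySem.List.pyGetD S (-1) ((0 : Int), ([] : List Int)) = S.getLast hS_ne :=
      pyGetD_neg_one S hS_ne _
    rw [hlastget]
    obtain ⟨c0, hc0mem, hc0eq⟩ := List.mem_map.mp (hSperm.mem_iff.mp (List.getLast_mem hS_ne))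
    have hMmax : ∀ p ∈ S, p.1 ≤ (S.getLast hS_ne).1 :=
      pairwise_le_getLast Prod.fst S hSfst hS_ne
    have hres : ∀ y, y ∈ resLoopA S (S.getLast hS_ne).1 S.length ↔
        ∃ c ∈ G, scoreB info (adjA n c) = (S.getLast hS_ne).1 ∧ adjA n c = y := by
      intro y
      rw [mem_resLoopA S hSfst hS_ne y]
      constructor
      · rintro ⟨p, hp, h1, h2⟩
        obtain ⟨c, hcm, rfl⟩ := List.mem_map.mp (hSperm.mem_iff.mp hp)
        exact ⟨c, hcm, h1, h2⟩
      · rintro ⟨c, hcm, h1, h2⟩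
        exact ⟨(scoreB info (adjA n c), adjA n c),
          hSperm.mem_iff.mpr (List.mem_map.mpr ⟨c, hcm, rfl⟩), h1, h2⟩
    have hLbs : (S.getLast hS_ne).1 = bs := by
      have h1 : (S.getLast hS_ne).1 ≤ bs := by
        rcases hmaxG c0 hc0mem with h | ⟨h, -⟩ <;> rw [← hc0eq] <;> omega
      have h2 : bs ≤ (S.getLast hS_ne).1 := by
        have hm : (scoreB info (adjA n c1), adjA n c1) ∈ S :=
          hSperm.mem_iff.mpr (List.mem_map.mpr ⟨c1, hc1G, rfl⟩)
        have := hMmax _ hm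
        simp only at this
        rw [hbs, hbc']
        exact this
      omega
    by_cases hMpos : (S.getLast hS_ne).1 > 0
    · rw [if_pos hMpos, if_pos (by omega : bs > 0)]
      have hres_ne : resLoopA S (S.getLast hS_ne).1 S.length ≠ [] := by
        refine List.ne_nil_of_mem ((hres (S.getLast hS_ne).2).mpr ⟨c0, hc0mem, ?_, ?_⟩)
        · rw [← hc0eq]
        · rw [← hc0eq]
      set res := resLoopA S (S.getLast hS_ne).1 S.length with hresdef
      have hres1_ne : res.map List.reverse ≠ [] := by simpa using hres_ne
      set res2 := PySem.List.sorted (res.map List.reverse) (fun x => x) with hres2def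
      have hres2_ne : res2 ≠ [] := fun h => hres1_ne ((PySem.List.sorted_eq_nil_iff _ _ _).mp h)
      have hres2perm : res2.Perm (res.map List.reverse) := PySem.List.sorted_perm _ _ _
      have hres3_ne : res2.map List.reverse ≠ [] := by simpa using hres2_ne
      rw [pyGetD_neg_one _ hres3_ne]
      have hgl : (res2.map List.reverse).getLast hres3_ne = (res2.getLast hres2_ne).reverse :=
        List.getLast_map (by simpa using hres2_ne)
      rw [hgl]
      obtain ⟨y, hymem, hyrev⟩ :=
        List.mem_map.mp (hres2perm.mem_iff.mp (List.getLast_mem hres2_ne))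
      obtain ⟨c_o, hcom, hcos, hcoadj⟩ := (hres y).mp hymem
      have hp2 : res2.Pairwise
          (fun a b => (fun x : List Int => x) a ≤ (fun x : List Int => x) b) := by
        rw [hres2def]
        have hi : (fun (a b : List ℤ) => a.decidableLT b)
            = (LinearOrder.toDecidableLT : DecidableLT (List ℤ)) := by
          funext a b; exact Subsingleton.elim _ _
        rw [hi]
        exact PySem.List.sorted_pairwise (res.map List.reverse) (fun x : List Int => x)
      have hgmax : ∀ z ∈ res.map List.reverse, z ≤ res2.getLast hres2_ne :=
        fun z hz => pairwise_le_getLast (fun x : List Int => x) res2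
          hp2 hres2_ne z (hres2perm.mem_iff.mpr hz)
      have hbcres : bc ∈ res := by
        refine (hres bc).mpr ⟨c1, hc1G, ?_, hbc'.symm⟩
        rw [← hbc', ← hbs, hLbs]
      have h1 : bc.reverse ≤ res2.getLast hres2_ne :=
        hgmax _ (List.mem_map.mpr ⟨bc, hbcres, rfl⟩)
      have h2 : y.reverse ≤ br := by
        rcases hmaxG c_o hcom with h | ⟨-, h⟩
        · rw [hcos, hLbs] at h; omega
        · rw [hcoadj] at h; exact not_lt.mp h
      have hrevs : y.reverse = bc.reverse := by
        refine le_antisymm ?_ ?_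
        · rw [hbr] at h2
          exact h2
        · rw [hyrev]
          exact h1
      have : y = bc := List.reverse_injective hrevs
      rw [← hyrev, List.reverse_reverse, this]
    · rw [if_neg hMpos, if_neg (by omega)]
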